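-- pv_equiv track=rewrite | github.com/63847051/redesigned-carnival | memory-compress/integration.py | format_memory_md
-- ===== SOURCE A (Python) =====
-- from typing import List, Dict, Optional
--
-- def format_memory_md(messages: List[Dict]) -> str:
--     """
--     将消息列表格式化为 MEMORY.md 格式
--
--     参数:
--         messages: 消息列表
--
--     返回:
--         MEMORY.md 格式的文本
--     """
--     # 按日期分组
--     by_date = {}
--     for msg in messages:
--         date = msg.get("timestamp", "")[:10]
--         if date not in by_date:
--             by_date[date] = []
--         by_date[date].append(msg)
--
--     # 生成内容
--     lines = []
--     for date in sorted(by_date.keys(), reverse=True):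
--         lines.append(f"\n## 📝 今日决策（{date}）\n")
--
--         for msg in by_date[date]:
--             content = msg.get("content", "")
--             if content.startswith('- '):
--                 lines.append(f"{content}")
--             else:
--                 lines.append(f"- {content}")
--
--         lines.append("")
--
--     return "\n".join(lines)
-- ===== SOURCE B (Python) =====
-- def format_memory_md(messages):
--     """Sorted distinct dates + per-date filter, comprehension-built lines (no dict grouping)."""
--     key = lambda m: m.get("timestamp", "")[:10]
--     fmt = lambda c: c if c.startswith("- ") else "- " + c
--     dates = sorted({key(m) for m in messages}, reverse=True)
--     block = lambda d: ["\n## 📝 今日决策（%s）\n" % d] \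
--         + [fmt(m.get("content", "")) for m in messages if key(m) == d] + [""]
--     return "\n".join(line for d in dates for line in block(d))
-- ===== Notes on version B (the rewrite author's own statement) =====
-- stated objective: alternative
-- what changed: Replaces A's dict-of-lists accumulation followed by a key sort with computing the sorted distinct date keys up front and building each date's block by filtering the message list, assembling all lines in one comprehension.
import Mathlib
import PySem

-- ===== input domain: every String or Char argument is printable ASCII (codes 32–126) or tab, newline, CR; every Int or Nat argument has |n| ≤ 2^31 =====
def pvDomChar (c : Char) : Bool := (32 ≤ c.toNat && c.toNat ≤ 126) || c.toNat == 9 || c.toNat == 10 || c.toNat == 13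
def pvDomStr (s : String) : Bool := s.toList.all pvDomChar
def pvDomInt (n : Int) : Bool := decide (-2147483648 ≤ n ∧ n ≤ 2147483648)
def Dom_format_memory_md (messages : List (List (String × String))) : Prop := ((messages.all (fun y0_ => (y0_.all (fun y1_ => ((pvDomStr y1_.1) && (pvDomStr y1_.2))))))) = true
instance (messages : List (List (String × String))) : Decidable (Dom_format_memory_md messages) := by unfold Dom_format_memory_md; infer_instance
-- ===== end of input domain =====

-- B groups by sorting the distinct date keys and filtering per date instead of A's dict accumulation; alternative decomposition, not claimed faster.

-- ===== PORT A =====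
def format_memory_md (messages : List (List (String × String))) : String :=
  let by_date : PySem.Dict String (List (List (String × String))) :=
    messages.foldl (fun d msg =>
      let date := PySem.Str.slice ((PySem.Dict.mk msg).getD "timestamp" "") none (some 10)
      let d := if d.contains date then d else d.insert date []
      d.modify date [] (fun g => g ++ [msg])) PySem.Dict.empty
  let lines : List String :=
    (PySem.List.sorted by_date.keys (fun x => x) true).foldl (fun lines date =>
      let lines := lines ++ ["\n## 📝 今日决策（" ++ date ++ "）\n"]
      let lines := (by_date.getD date []).foldl (fun lines msg =>
        let content := (PySem.Dict.mk msg).getD "content" ""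
        if PySem.Str.startswith content "- " then lines ++ [content]
        else lines ++ ["- " ++ content]) lines
      lines ++ [""]) []
  PySem.Str.join "\n" lines

-- ===== PORT B =====
def fmKey (m : List (String × String)) : String :=
  PySem.Str.slice ((PySem.Dict.mk m).getD "timestamp" "") none (some 10)

def fmFmt (c : String) : String :=
  if PySem.Str.startswith c "- " then c else "- " ++ c

def fmBlock (messages : List (List (String × String))) (d : String) : List String :=
  ["\n## 📝 今日决策（" ++ d ++ "）\n"]
    ++ (messages.filter (fun m => fmKey m == d)).map (fun m => fmFmt ((PySem.Dict.mk m).getD "content" ""))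
    ++ [""]

def format_memory_md_alt (messages : List (List (String × String))) : String :=
  let dates := PySem.List.sorted (PySem.Set.ofList (messages.map fmKey)) (fun x => x) true
  PySem.Str.join "\n" (dates.flatMap (fmBlock messages))

-- ===== PRECONDITION & SPEC =====
def Spec_format_memory_md (messages : List (List (String × String))) (out : String) : Prop := out = format_memory_md_alt messages
instance (messages : List (List (String × String))) (out : String) : Decidable (Spec_format_memory_md messages out) := by unfold Spec_format_memory_md; infer_instance

-- ===== CLAIM (what is proved, stated in full; the proofs are below) =====
def Claim_equal_format_memory_md : Prop := ∀ (messages : List (List (String × String))), Dom_format_memory_md messages → Spec_format_memory_md messages (format_memory_md messages)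

-- ===== LEMMAS AND PROOFS =====

-- A's grouping loop, one abstract step
def fmStep (d : PySem.Dict String (List (List (String × String)))) (msg : List (String × String)) :
    PySem.Dict String (List (List (String × String))) :=
  let date := fmKey msg
  let d := if d.contains date then d else d.insert date []
  d.modify date [] (fun g => g ++ [msg])

-- A, rewritten without let-bindings (definitionally equal; used only to state the rewrites)
def fmA (messages : List (List (String × String))) : String :=
  PySem.Str.join "\n"
    ((PySem.List.sorted (messages.foldl fmStep PySem.Dict.empty).keys (fun x => x) true).foldl
      (fun lines date =>
        (((messages.foldl fmStep PySem.Dict.empty).getD date []).foldl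
          (fun lines msg =>
            if PySem.Str.startswith ((PySem.Dict.mk msg).getD "content" "") "- " then
              lines ++ [(PySem.Dict.mk msg).getD "content" ""]
            else lines ++ ["- " ++ (PySem.Dict.mk msg).getD "content" ""])
          (lines ++ ["\n## 📝 今日决策（" ++ date ++ "）\n"])) ++ [""])
      [])

lemma fmStep_keys (d : PySem.Dict String (List (List (String × String)))) (msg : List (String × String)) :
    (fmStep d msg).keys = PySem.Set.add d.keys (fmKey msg) := by
  unfold fmStep
  rw [PySem.Dict.keys_modify]
  by_cases h : d.contains (fmKey msg) = true
  · have hm : fmKey msg ∈ d.keys := (PySem.Dict.contains_iff_mem_keys _ _).mp h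
    simp [PySem.Set.add, h, PySem.Dict.keys_insert_of_contains _ _ h, hm]
  · have hf : d.contains (fmKey msg) = false := by simpa using h
    have hm : fmKey msg ∉ d.keys := fun hm =>
      by simp [(PySem.Dict.contains_iff_mem_keys _ _).mpr hm] at hf
    rw [if_neg h, PySem.Dict.insert_insert_self,
      PySem.Dict.keys_insert_of_not_contains _ _ hf]
    simp [PySem.Set.add, hm]

lemma fmStep_getD (d : PySem.Dict String (List (List (String × String)))) (msg : List (String × String))
    (c : String) :
    (fmStep d msg).getD c [] =
      d.getD c [] ++ (if fmKey msg == c then [msg] else []) := by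
  unfold fmStep
  by_cases hc : c = fmKey msg
  · subst hc
    rw [PySem.Dict.getD_modify_self]
    by_cases h : d.contains (fmKey msg) = true
    · simp [h]
    · have hf : d.contains (fmKey msg) = false := by simpa using h
      simp [h, PySem.Dict.getD_of_not_contains _ _ hf]
  · have hc' : ¬ fmKey msg = c := fun h => hc h.symm
    rw [PySem.Dict.getD_modify_of_ne _ _ _ hc]
    by_cases h : d.contains (fmKey msg) = true
    · simp [h, hc']
    · simp [h, hc', PySem.Dict.getD_insert_of_ne _ _ _ hc]

lemma fm_foldl_keys (messages : List (List (String × String)))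
    (d : PySem.Dict String (List (List (String × String)))) :
    (messages.foldl fmStep d).keys = PySem.Set.update d.keys (messages.map fmKey) := by
  induction messages generalizing d with
  | nil => simp [PySem.Set.update]
  | cons m t ih => simp only [List.foldl_cons, List.map_cons, ih, fmStep_keys, PySem.Set.update]

lemma fm_foldl_getD (messages : List (List (String × String)))
    (d : PySem.Dict String (List (List (String × String)))) (c : String) :
    (messages.foldl fmStep d).getD c [] =
      d.getD c [] ++ messages.filter (fun m => fmKey m == c) := by
  induction messages generalizing d with
  | nil => simp
  | cons m t ih =>
      simp only [List.foldl_cons, ih, fmStep_getD, List.filter_cons]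
      by_cases h : fmKey m == c <;> simp_all

-- ===== VERDICT (by name: the statement is the Claim_ definition above) =====
theorem format_memory_md_spec : Claim_equal_format_memory_md := by
  intro messages _
  show format_memory_md messages = format_memory_md_alt messages
  have hA : format_memory_md messages = fmA messages := rfl
  have hB : format_memory_md_alt messages =
      PySem.Str.join "\n"
        ((PySem.List.sorted (PySem.Set.ofList (messages.map fmKey)) (fun x => x) true).flatMap
          (fmBlock messages)) := rfl
  rw [hA, hB]
  unfold fmA
  have hkeys : (messages.foldl fmStep PySem.Dict.empty).keys
      = PySem.Set.ofList (messages.map fmKey) := by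
    rw [fm_foldl_keys, PySem.Set.ofList_eq_foldl]
    simp [PySem.Set.update, PySem.Dict.keys_empty]
  rw [hkeys]
  congr 1
  rw [PySem.List.foldl_congr_mem _ _ (fun acc date => acc ++ fmBlock messages date) _
    (by
      intro acc date _
      have hfun : (fun (lines : List String) (msg : List (String × String)) =>
          if PySem.Str.startswith ((PySem.Dict.mk msg).getD "content" "") "- " then
            lines ++ [(PySem.Dict.mk msg).getD "content" ""]
          else lines ++ ["- " ++ (PySem.Dict.mk msg).getD "content" ""])
          = fun lines msg => lines ++ [fmFmt ((PySem.Dict.mk msg).getD "content" "")] := by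
        funext lines msg
        simp only [fmFmt]
        split <;> rfl
      rw [hfun, PySem.List.foldl_append_singleton_eq_map, fm_foldl_getD]
      simp [fmBlock, PySem.Dict.getD_empty, List.append_assoc])]
  simpa using PySem.List.foldl_append_eq_flatMap (fmBlock messages) _ []
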